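-- pv_equiv track=rewrite | github.com/det9c/pytorch | smiley-torch.py | get_anchor
-- ===== SOURCE A (Python) =====
-- def get_anchor(iside_len,ibottom_len,iguess_up,iguess_across,npixels):
--     i=0
--     while i<100000: #infinite loop until stopping condition is satisfied
--           iend=iguess_up+iside_len
--           if(iend > npixels):
--               iguess_up=iguess_up-1
--           else:
--               break
--     i=0
--     while i<100000: #infinite loop until stopping condition is satisfied
--           iend=iguess_across+ibottom_len
--           if(iend > npixels):
--               iguess_across=iguess_across-1
--           else:
--               break
--
--     return iguess_up,iguess_across
-- ===== SOURCE B (Python) =====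
-- def get_anchor(iside_len, ibottom_len, iguess_up, iguess_across, npixels):
--     # Closed form: clamp each guess so that guess + length <= npixels.
--     return (min(iguess_up, npixels - iside_len),
--             min(iguess_across, npixels - ibottom_len))
-- ===== Notes on version B (the rewrite author's own statement) =====
-- stated objective: faster
-- what changed: Replaces the two decrement-until-fit while loops by the closed-form clamp min(guess, npixels - length).
import Mathlib
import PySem

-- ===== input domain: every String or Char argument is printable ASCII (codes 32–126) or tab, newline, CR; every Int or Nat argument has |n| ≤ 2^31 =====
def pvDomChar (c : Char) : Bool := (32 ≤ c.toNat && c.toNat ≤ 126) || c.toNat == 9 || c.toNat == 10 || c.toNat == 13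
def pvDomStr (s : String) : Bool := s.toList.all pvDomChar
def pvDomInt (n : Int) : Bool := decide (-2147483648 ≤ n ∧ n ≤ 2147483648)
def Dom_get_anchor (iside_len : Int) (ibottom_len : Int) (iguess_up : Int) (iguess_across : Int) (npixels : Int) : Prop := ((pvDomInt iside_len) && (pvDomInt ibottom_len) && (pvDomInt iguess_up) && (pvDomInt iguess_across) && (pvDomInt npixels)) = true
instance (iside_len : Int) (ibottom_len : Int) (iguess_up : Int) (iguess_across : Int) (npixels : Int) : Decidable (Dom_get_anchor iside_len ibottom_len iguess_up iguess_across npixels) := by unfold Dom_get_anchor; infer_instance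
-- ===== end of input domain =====

-- B replaces A's two decrement-until-fit loops by the closed-form clamp min(guess, npixels - length).
-- ===== PORT A =====
-- A's while loop: decrement `guess` while guess + len > npixels, then return guess.
-- (A's `i < 100000` guard is vacuous: i is never incremented; the loop exits only via break.)
def pvDecLoop (guess len npix : Int) : Int :=
  if guess + len > npix then pvDecLoop (guess - 1) len npix else guess
termination_by (guess + len - npix).toNat
decreasing_by omega

def get_anchor (iside_len : Int) (ibottom_len : Int) (iguess_up : Int) (iguess_across : Int) (npixels : Int) : List Int :=
  [pvDecLoop iguess_up iside_len npixels, pvDecLoop iguess_across ibottom_len npixels]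

-- ===== PORT B =====
def get_anchor_alt (iside_len : Int) (ibottom_len : Int) (iguess_up : Int) (iguess_across : Int) (npixels : Int) : List Int :=
  [min iguess_up (npixels - iside_len), min iguess_across (npixels - ibottom_len)]

-- ===== PRECONDITION & SPEC =====
def Spec_get_anchor (iside_len : Int) (ibottom_len : Int) (iguess_up : Int) (iguess_across : Int) (npixels : Int) (out : List Int) : Prop := out = get_anchor_alt iside_len ibottom_len iguess_up iguess_across npixels
instance (iside_len : Int) (ibottom_len : Int) (iguess_up : Int) (iguess_across : Int) (npixels : Int) (out : List Int) : Decidable (Spec_get_anchor iside_len ibottom_len iguess_up iguess_across npixels out) := by unfold Spec_get_anchor; infer_instance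

-- ===== CLAIM (what is proved, stated in full; the proofs are below) =====
def Claim_equal_get_anchor : Prop := ∀ (iside_len : Int) (ibottom_len : Int) (iguess_up : Int) (iguess_across : Int) (npixels : Int), Dom_get_anchor iside_len ibottom_len iguess_up iguess_across npixels → Spec_get_anchor iside_len ibottom_len iguess_up iguess_across npixels (get_anchor iside_len ibottom_len iguess_up iguess_across npixels)

-- ===== LEMMAS AND PROOFS =====
theorem pvDecLoop_eq_min (guess len npix : Int) : pvDecLoop guess len npix = min guess (npix - len) := by
  fun_induction pvDecLoop guess len npix with
  | _ => omega

-- ===== VERDICT (by name: the statement is the Claim_ definition above) =====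
theorem get_anchor_spec : Claim_equal_get_anchor := by
  intro iside_len ibottom_len iguess_up iguess_across npixels _
  unfold Spec_get_anchor get_anchor get_anchor_alt
  rw [pvDecLoop_eq_min, pvDecLoop_eq_min]
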